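-- pv_equiv track=rewrite | github.com/Jimdewit/AoC | advent 2019/challenge 04/number04.py | check_sizes
-- ===== SOURCE A (Python) =====
-- def check_sizes(number):
--     previous_digit = 0
--     second_previous_digit = 0
--     double = False
--     treble = False
--     for digit in str(number):
--         digit = int(digit)
--         matching_numbers = []
--         if digit < previous_digit:
--             return False, double, True
--         if digit == previous_digit:
--             double = True
--         if digit == second_previous_digit:
--             treble = True
--             matching_numbers += [digit]
--         second_previous_digit = previous_digit
--         previous_digit = digit
--     return True, double, treble
-- ===== SOURCE B (Python) =====
-- def check_sizes(number):
--     digits = [int(c) for c in str(number)]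
--     pairs = list(zip(digits, digits[1:]))
--     descent = next((j for j, (a, b) in enumerate(pairs) if b < a), None)
--     if descent is not None:
--         return False, any(x == y for x, y in pairs[:descent]), True
--     double = any(x == y for x, y in pairs)
--     treble = any(p[0] == q[1] for p, q in zip(pairs, pairs[1:]))
--     return True, double, treble
-- ===== Notes on version B (the rewrite author's own statement) =====
-- stated objective: alternative
-- what changed: Replaces A's single stateful scan with two lagging digit variables by staged list passes: build the list of adjacent digit pairs, locate the first descending pair, and derive the double/treble flags from the pair list (any equal pair before the descent; any pair of pairs sharing its outer digits). Pre_ excludes negative numbers, where A raises ValueError on the '-' sign.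
-- intended difference: For number 0, A's zero-initialised previous/second_previous sentinels accidentally match the single digit and A returns (True, True, True); B returns (True, False, False), the intended value since a one-digit number has no repeated digits. — e.g. on check_sizes(0): A returns (true, true, true), B returns (true, false, false)
import Mathlib
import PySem

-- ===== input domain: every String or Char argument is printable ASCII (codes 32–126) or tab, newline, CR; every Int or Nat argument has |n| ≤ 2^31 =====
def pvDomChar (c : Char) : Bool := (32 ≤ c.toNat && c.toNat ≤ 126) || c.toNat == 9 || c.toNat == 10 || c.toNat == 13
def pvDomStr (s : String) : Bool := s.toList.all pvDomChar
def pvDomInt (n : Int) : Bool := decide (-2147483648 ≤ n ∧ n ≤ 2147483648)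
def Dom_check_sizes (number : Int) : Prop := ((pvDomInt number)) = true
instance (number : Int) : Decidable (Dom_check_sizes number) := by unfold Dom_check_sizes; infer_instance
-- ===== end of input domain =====

-- B re-decomposes the single stateful scan into staged list passes (pair the digits, find the
-- first descent, then derive the two flags from the pair list); same cost, different structure.

-- ===== PORT A =====
-- loop of A; returns none where Python's int(digit) raises ValueError (only reachable outside Pre_)
def checkSizesLoopA : List Char → Int → Int → Bool → Bool → Option (Bool × Bool × Bool)
  | [], _, _, double, treble => some (true, double, treble)
  | c :: rest, previous, secondPrevious, double, treble =>
    match PySem.Int.ofStr? (String.ofList [c]) with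
    | none => none
    | some digit =>
      if digit < previous then some (false, double, true)
      else
        let double := if digit = previous then true else double
        let treble := if digit = secondPrevious then true else treble
        checkSizesLoopA rest digit previous double treble

def check_sizes (number : Int) : Bool × Bool × Bool :=
  (checkSizesLoopA (PySem.Int.toStr number).toList 0 0 false false).getD (false, false, false)

-- ===== PORT B =====
-- [int(c) for c in str(number)]; none where int(c) raises ValueError (only reachable outside Pre_)
def pvParseDigits : List Char → Option (List Int)
  | [] => some []
  | c :: rest =>
    match PySem.Int.ofStr? (String.ofList [c]) with
    | none => none
    | some d => (pvParseDigits rest).map (fun ds => d :: ds)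

-- any(x == y for x, y in ps)
def pvAdjEq (ps : List (Int × Int)) : Bool := ps.any (fun p => p.1 == p.2)

def check_sizes_alt (number : Int) : Bool × Bool × Bool :=
  match pvParseDigits (PySem.Int.toStr number).toList with
  | none => (false, false, false)
  | some digits =>
    let pairs := digits.zip digits.tail
    match pairs.findIdx? (fun p => decide (p.2 < p.1)) with
    | some j => (false, pvAdjEq (pairs.take j), true)
    | none => (true, pvAdjEq pairs, (pairs.zip pairs.tail).any (fun q => q.1.1 == q.2.2))

-- ===== PRECONDITION & SPEC =====
-- A raises ValueError on negative numbers (int('-') on the sign of str(number)); Pre_ excludes exactly those.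
def Pre_check_sizes (number : Int) : Prop := 0 ≤ number
instance (number : Int) : Decidable (Pre_check_sizes number) := by unfold Pre_check_sizes; infer_instance
def pvWitness_check_sizes : Int := 122345

-- For number 0 A's zero-initialised previous/second_previous sentinels accidentally match the single
-- digit and A returns (True, True, True); B returns (True, False, False), the intended value since a
-- one-digit number has no repeated digits.
def D_check_sizes (number : Int) : Prop := number = 0
instance (number : Int) : Decidable (D_check_sizes number) := by unfold D_check_sizes; infer_instance

def Spec_check_sizes (number : Int) (out : Bool × Bool × Bool) : Prop := ¬ D_check_sizes number → out = check_sizes_alt number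
instance (number : Int) (out : Bool × Bool × Bool) : Decidable (Spec_check_sizes number out) := by unfold Spec_check_sizes; infer_instance

def pvDiffWitness_check_sizes : Int := 0
def pvDiffWitnessOut_check_sizes : (Bool × Bool × Bool) × (Bool × Bool × Bool) :=
  ((true, true, true), (true, false, false))

-- ===== CLAIM (what is proved, stated in full; the proofs are below) =====
def Claim_unchanged_check_sizes : Prop := ∀ (number : Int), Dom_check_sizes number → Pre_check_sizes number → Spec_check_sizes number (check_sizes number)
def Claim_changed_check_sizes : Prop := Dom_check_sizes (pvDiffWitness_check_sizes) ∧ Pre_check_sizes (pvDiffWitness_check_sizes) ∧ D_check_sizes (pvDiffWitness_check_sizes) ∧ check_sizes (pvDiffWitness_check_sizes) = pvDiffWitnessOut_check_sizes.1 ∧ check_sizes_alt (pvDiffWitness_check_sizes) = pvDiffWitnessOut_check_sizes.2 ∧ pvDiffWitnessOut_check_sizes.1 ≠ pvDiffWitnessOut_check_sizes.2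
def Claim_exact_check_sizes : Prop := ∀ (number : Int), Dom_check_sizes number → Pre_check_sizes number → D_check_sizes number → check_sizes number ≠ check_sizes_alt number

-- ===== LEMMAS AND PROOFS =====

-- most-significant-first decimal digits (revDigits 0 = [0]), the digit list str(n) prints
def revDigits (n : Nat) : List Nat :=
  if _h : n < 10 then [n] else revDigits (n / 10) ++ [n % 10]
  decreasing_by exact Nat.div_lt_self (by omega) (by omega)

theorem toDigitsCore_eq (fuel : Nat) : ∀ (n : Nat) (acc : List Char), n < fuel →
    Nat.toDigitsCore 10 fuel n acc = (revDigits n).map Nat.digitChar ++ acc := by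
  induction fuel with
  | zero => intro n acc h; omega
  | succ fuel ih =>
    intro n acc h
    rw [Nat.toDigitsCore]
    by_cases h10 : n < 10
    · have : n / 10 = 0 := Nat.div_eq_of_lt h10
      simp [this, revDigits, h10, Nat.mod_eq_of_lt h10]
    · have hne : n / 10 ≠ 0 := by omega
      have hlt : n / 10 < fuel := by
        have := Nat.div_lt_self (show 0 < n by omega) (show 1 < 10 by omega); omega
      simp only [hne]
      rw [ih (n / 10) _ hlt]
      conv_rhs => rw [revDigits]
      simp [h10]

theorem revDigits_lt (n : Nat) : ∀ d ∈ revDigits n, d < 10 := by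
  induction n using Nat.strong_induction_on with
  | _ n ih =>
    intro d hd
    rw [revDigits] at hd
    split_ifs at hd with h
    · simp at hd; omega
    · rcases List.mem_append.mp hd with hd' | hd'
      · exact ih (n / 10) (Nat.div_lt_self (by omega) (by omega)) d hd'
      · simp at hd'; omega

theorem revDigits_head (n : Nat) (hn : 0 < n) :
    ∃ d t, revDigits n = d :: t ∧ 0 < d := by
  induction n using Nat.strong_induction_on with
  | _ n ih =>
    by_cases h : n < 10
    · exact ⟨n, [], by rw [revDigits]; simp [h], hn⟩
    · obtain ⟨d, t, hdt, hd⟩ := ih (n / 10) (Nat.div_lt_self (by omega) (by omega)) (by omega)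
      exact ⟨d, t ++ [n % 10], by rw [revDigits]; simp [h, hdt], hd⟩

theorem parse_digitChar (d : Nat) (_h : d < 10) :
    PySem.Int.ofStr? (String.ofList [Nat.digitChar d]) = some (d : Int) := by
  interval_cases d <;> decide

theorem parse_digitChars (L : List Nat) (h : ∀ d ∈ L, d < 10) :
    pvParseDigits (L.map Nat.digitChar) = some (L.map (fun d => (d : Int))) := by
  induction L with
  | nil => rfl
  | cons d t ih =>
    simp only [List.map_cons, pvParseDigits, parse_digitChar d (h d (by simp))]
    rw [ih (fun x hx => h x (by simp [hx]))]
    rfl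

-- A's int-valued loop (same state, parsing stripped)
def loopAI : List Int → Int → Int → Bool → Bool → Bool × Bool × Bool
  | [], _, _, double, treble => (true, double, treble)
  | e :: rest, prev, sprev, double, treble =>
    if e < prev then (false, double, true)
    else loopAI rest e prev (if e = prev then true else double) (if e = sprev then true else treble)

theorem loopA_parse (cs : List Char) : ∀ (ds : List Int) (p sp : Int) (d t : Bool),
    pvParseDigits cs = some ds →
    checkSizesLoopA cs p sp d t = some (loopAI ds p sp d t) := by
  induction cs with
  | nil => intro ds p sp d t h; simp [pvParseDigits] at h; subst h; rfl
  | cons c rest ih =>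
    intro ds p sp d t h
    simp only [pvParseDigits] at h
    cases hc : PySem.Int.ofStr? (String.ofList [c]) with
    | none => rw [hc] at h; simp at h
    | some e =>
      rw [hc] at h
      simp only [Option.map_eq_some_iff] at h
      obtain ⟨ds', hds', rfl⟩ := h
      simp only [checkSizesLoopA, hc, loopAI]
      by_cases hlt : e < p
      · simp [hlt]
      · simp only [hlt]
        exact ih ds' e p _ _ hds'

-- characterisation of A's loop by B's staged passes, generalised over the state
theorem loopAI_eq (ds : List Int) : ∀ (prev sprev : Int) (d t : Bool),
    loopAI ds prev sprev d t =
      match ((prev :: ds).zip ds).findIdx? (fun p => decide (p.2 < p.1)) with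
      | some j => (false, d || pvAdjEq (((prev :: ds).zip ds).take j), true)
      | none => (true, d || pvAdjEq ((prev :: ds).zip ds),
                 t || (ds.zip (sprev :: prev :: ds)).any (fun p => p.1 == p.2)) := by
  induction ds with
  | nil => intro prev sprev d t; simp [loopAI, pvAdjEq]
  | cons e rest ih =>
    intro prev sprev d t
    by_cases hlt : e < prev
    · simp [loopAI, hlt, List.findIdx?_cons, pvAdjEq]
    · simp only [loopAI, hlt, decide_false, List.zip_cons_cons, List.findIdx?_cons,
        Bool.false_eq_true, if_false]
      rw [ih e prev]
      cases hfi : ((e :: rest).zip rest).findIdx? (fun p => decide (p.2 < p.1)) with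
      | some j =>
        simp only [Option.map_some, List.take_succ_cons, Prod.mk.injEq, true_and, and_true]
        by_cases heq : e = prev
        · subst heq; simp [pvAdjEq]
        · have hb : (prev == e) = false := by simp [Ne.symm heq]
          simp [pvAdjEq, heq, hb]
      | none =>
        simp only [Option.map_none, Prod.mk.injEq, true_and]
        constructor
        · by_cases heq : e = prev
          · subst heq; simp [pvAdjEq]
          · have hb : (prev == e) = false := by simp [Ne.symm heq]
            simp [pvAdjEq, heq, hb]
        · simp only [List.any_cons]
          by_cases heq : e = sprev
          · subst heq; simp
          · have hb : (e == sprev) = false := by simp [heq]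
            simp [heq, hb]

theorem pairs_tail (ds : List Int) :
    (ds.zip ds.tail).tail = ds.tail.zip ds.tail.tail := by
  cases ds with
  | nil => rfl
  | cons a t => cases t <;> simp

theorem zip3_any (ds : List Int) :
    ((ds.zip ds.tail).zip (ds.tail.zip ds.tail.tail)).any (fun q => q.1.1 == q.2.2)
      = (ds.tail.tail.zip ds).any (fun p => p.1 == p.2) := by
  induction ds with
  | nil => rfl
  | cons a rest ih =>
    cases rest with
    | nil => rfl
    | cons b rest2 =>
      cases rest2 with
      | nil => rfl
      | cons c rest3 =>
        simp only [List.tail_cons, List.zip_cons_cons, List.any_cons] at *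
        rw [← ih]
        have hcomm : (a == c) = (c == a) := by
          by_cases h : a = c
          · subst h; rfl
          · simp [h, Ne.symm h]
        rw [hcomm]

-- ===== VERDICT (by name: the statements are the Claim_ definitions above) =====
theorem check_sizes_spec : Claim_unchanged_check_sizes := by
  intro n _ hpre hnd
  have hge : (0 : Int) ≤ n := hpre
  have hne : n ≠ 0 := fun h => hnd h
  have hpos : 0 < n.toNat := by omega
  -- str(n) = the digit characters of revDigits n.toNat
  have hchars : (PySem.Int.toStr n).toList = (revDigits n.toNat).map Nat.digitChar := by
    rw [PySem.Int.toList_toStr]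
    unfold PySem.Int.toChars
    rw [if_neg (by omega)]
    unfold Nat.toDigits
    rw [toDigitsCore_eq (n.toNat + 1) n.toNat [] (by omega)]
    simp
  obtain ⟨d0, tl, hL, hd0⟩ := revDigits_head n.toNat hpos
  have hlt10 := revDigits_lt n.toNat
  have hparse : pvParseDigits ((revDigits n.toNat).map Nat.digitChar)
      = some ((revDigits n.toNat).map (fun d => (d : Int))) :=
    parse_digitChars _ hlt10
  -- both sides, reduced to the parsed digit list ds
  set ds : List Int := (revDigits n.toNat).map (fun d => (d : Int)) with hds
  have hdsL : ds = (d0 : Int) :: tl.map (fun d => (d : Int)) := by rw [hds, hL]; rfl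
  unfold check_sizes check_sizes_alt
  rw [hchars, hparse, loopA_parse _ ds 0 0 false false hparse, Option.getD_some]
  rw [loopAI_eq]
  -- the virtual pair (0, d0) is neither a descent nor an equality
  have hd0pos : (0 : Int) < (d0 : Int) := by exact_mod_cast hd0
  have hhead : ((0 : Int) :: ds).zip ds = (0, (d0 : Int)) :: ds.zip ds.tail := by
    rw [hdsL]; rfl
  rw [hhead, List.findIdx?_cons]
  have hnlt : (decide ((d0 : Int) < 0)) = false := by
    simp only [decide_eq_false_iff_not]; omega
  have h0 : ((0 : Int) == (d0 : Int)) = false := by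
    simp only [beq_eq_false_iff_ne, ne_eq]; omega
  have h1 : ((d0 : Int) == 0) = false := by
    simp only [beq_eq_false_iff_ne, ne_eq]; omega
  cases hfi : (ds.zip ds.tail).findIdx? (fun p => decide (p.2 < p.1)) with
  | some j =>
    simp only [hnlt, Bool.false_eq_true, if_false, Option.map_some, List.take_succ_cons,
      pvAdjEq, List.any_cons, h0, Bool.false_or]
    rw [hfi]
  | none =>
    -- treble: the two virtual pairs (d0,0) and (r0,0) are dead, the rest is B's zip of pairs
    have htr : (ds.zip ((0 : Int) :: 0 :: ds)).any (fun p => p.1 == p.2)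
        = ((ds.zip ds.tail).zip ((ds.zip ds.tail).tail)).any (fun q => q.1.1 == q.2.2) := by
      rw [pairs_tail, zip3_any]
      rw [hdsL]
      cases htl : tl.map (fun d => (d : Int)) with
      | nil => simp [h1]
      | cons r0 tl2 =>
        simp only [List.zip_cons_cons, List.any_cons, List.tail_cons]
        -- from no-descent: d0 ≤ r0, hence r0 ≠ 0
        have hmem : ((d0 : Int), r0) ∈ ds.zip ds.tail := by
          rw [hdsL, htl]; simp
        have hndesc : ¬ (r0 < (d0 : Int)) := by
          have := List.findIdx?_eq_none_iff.mp hfi _ hmem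
          simpa using this
        have h2 : (r0 == (0 : Int)) = false := by
          simp only [beq_eq_false_iff_ne, ne_eq]; omega
        rw [h1, h2]
        simp
    simp only [hnlt, Bool.false_eq_true, if_false, Option.map_none, htr,
      pvAdjEq, List.any_cons, h0, Bool.false_or]
    rw [hfi]

theorem check_sizes_changed : Claim_changed_check_sizes := by
  unfold Claim_changed_check_sizes; decide

theorem check_sizes_tight : Claim_exact_check_sizes := by
  intro n _ _ hD
  subst hD
  decide
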